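-- pv_equiv track=rewrite | github.com/IAMKOTARO/paiza | S/s037.py | calc_my_points
-- ===== SOURCE A (Python) =====
-- import collections
--
-- def calc_my_points(my_number:int, other_numbers:list) -> int:
--     other_numbers_collection = collections.Counter(other_numbers)
--     if other_numbers_collection[my_number] > 0:
--         return 0
--     else:
--         point = 0
--         for k, v in other_numbers_collection.items():
--             if v == 1 and k > my_number:
--                 return 0
--             point += k * v
--         point += my_number
--         return point
-- ===== SOURCE B (Python) =====
-- def calc_my_points(my_number: int, other_numbers: list) -> int:
--     # sort-then-group: walk maximal runs of equal values instead of hashing counts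
--     if my_number in other_numbers:
--         return 0
--     srt = sorted(other_numbers)
--     total = 0
--     i = 0
--     n = len(srt)
--     while i < n:
--         j = i + 1
--         while j < n and srt[j] == srt[i]:
--             j += 1
--         if j - i == 1 and srt[i] > my_number:
--             return 0
--         total += srt[i] * (j - i)
--         i = j
--     return total + my_number
-- ===== Notes on version B (the rewrite author's own statement) =====
-- stated objective: alternative
-- what changed: Replaces Counter-based hash counting and a scan over counter items by a guard for membership plus a sort-then-group traversal: the sorted copy is walked in maximal runs of equal values, a run of length 1 greater than my_number yields 0, otherwise the run sums accumulate.
import Mathlib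
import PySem

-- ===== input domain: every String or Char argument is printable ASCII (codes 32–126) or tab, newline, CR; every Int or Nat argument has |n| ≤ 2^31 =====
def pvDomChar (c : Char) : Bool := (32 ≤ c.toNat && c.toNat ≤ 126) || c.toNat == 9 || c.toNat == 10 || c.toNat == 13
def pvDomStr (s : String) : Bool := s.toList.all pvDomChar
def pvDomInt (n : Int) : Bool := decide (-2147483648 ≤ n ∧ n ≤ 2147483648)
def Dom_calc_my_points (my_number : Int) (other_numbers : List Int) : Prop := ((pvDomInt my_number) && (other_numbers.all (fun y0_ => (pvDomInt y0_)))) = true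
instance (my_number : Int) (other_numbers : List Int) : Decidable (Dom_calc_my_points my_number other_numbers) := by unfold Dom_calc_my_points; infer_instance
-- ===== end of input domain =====

-- B replaces A's Counter-based hash counting by a membership guard plus a sort-then-group
-- walk over maximal runs of equal values (alternative decomposition, not claimed faster).

-- ===== PORT A =====
-- the 'for k, v in counter.items()' loop with its early return
def pvLoopA (my_number : Int) : List (Int × Int) → Int → Int
  | [], point => point + my_number
  | (k, v) :: rest, point =>
      if v = 1 ∧ my_number < k then 0
      else pvLoopA my_number rest (point + k * v)

def calc_my_points (my_number : Int) (other_numbers : List Int) : Int :=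
  let c := PySem.Dict.counter other_numbers
  if c.getD my_number 0 > 0 then 0
  else pvLoopA my_number c.items 0

-- ===== PORT B =====
-- the outer while-loop of Source B: each step consumes one maximal run of equal values
-- (the inner 'while j < n and srt[j] == srt[i]' is the takeWhile/dropWhile split of the tail)
def pvRuns (my_number : Int) (s : List Int) (total : Int) : Int :=
  match s with
  | [] => total + my_number
  | x :: rest =>
      let cnt : Int := (rest.takeWhile (fun y => y == x)).length + 1
      if cnt = 1 ∧ my_number < x then 0
      else pvRuns my_number (rest.dropWhile (fun y => y == x)) (total + x * cnt)
termination_by s.length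
decreasing_by simpa using Nat.lt_succ_of_le (List.length_dropWhile_le _ _)

def calc_my_points_alt (my_number : Int) (other_numbers : List Int) : Int :=
  if other_numbers.contains my_number then 0
  else pvRuns my_number (PySem.List.sorted other_numbers (fun x => x) false) 0

-- ===== PRECONDITION & SPEC =====
def Spec_calc_my_points (my_number : Int) (other_numbers : List Int) (out : Int) : Prop := out = calc_my_points_alt my_number other_numbers
instance (my_number : Int) (other_numbers : List Int) (out : Int) : Decidable (Spec_calc_my_points my_number other_numbers out) := by unfold Spec_calc_my_points; infer_instance

-- ===== CLAIM (what is proved, stated in full; the proofs are below) =====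
def Claim_equal_calc_my_points : Prop := ∀ (my_number : Int) (other_numbers : List Int), Dom_calc_my_points my_number other_numbers → Spec_calc_my_points my_number other_numbers (calc_my_points my_number other_numbers)

-- ===== LEMMAS AND PROOFS =====

-- the condition both programs test: some value occurring exactly once exceeds my_number
def pvBad (my : Int) (xs : List Int) : Bool :=
  xs.any (fun k => xs.count k == 1 && decide (my < k))

theorem pvLoopA_spec (my : Int) : ∀ (L : List (Int × Int)) (p : Int),
    pvLoopA my L p =
      if L.any (fun kv => kv.2 == 1 && decide (my < kv.1)) then 0
      else p + (L.map (fun kv => kv.1 * kv.2)).sum + my := by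
  intro L
  induction L with
  | nil => intro p; simp [pvLoopA]
  | cons kv rest ih =>
    intro p
    obtain ⟨k, v⟩ := kv
    by_cases h : v = 1 ∧ my < k
    · simp [pvLoopA, h]
    · rw [show pvLoopA my ((k, v) :: rest) p = pvLoopA my rest (p + k * v) from by
        simp [pvLoopA, h], ih]
      have hb : (v == 1 && decide (my < k)) = false := by
        rcases Decidable.not_and_iff_not_or_not.mp h with h1 | h1 <;> simp [h1]
      simp only [List.any_cons, hb, Bool.false_or, List.map_cons, List.sum_cons]
      split_ifs <;> ring

theorem pvSum_counter (xs : List Int) :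
    ((PySem.Set.ofList xs).map (fun k => k * (xs.count k : Int))).sum = xs.sum := by
  have hnd : (PySem.Set.ofList xs).Nodup := PySem.Set.nodup_ofList xs
  have htf : (PySem.Set.ofList xs).toFinset = xs.toFinset := by
    ext k; simp [PySem.Set.mem_ofList]
  rw [← List.sum_toFinset _ hnd, htf]
  have := Finset.sum_list_map_count xs (fun k : Int => k)
  simp only [List.map_id'] at this
  rw [show xs.sum = ∑ m ∈ xs.toFinset, xs.count m • m from by simpa using this]
  refine Finset.sum_congr rfl fun m _ => ?_
  simp [mul_comm]

theorem pvRuns_spec (my : Int) : ∀ (n : Nat) (s : List Int), s.length ≤ n →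
    s.Pairwise (· ≤ ·) → ∀ t : Int,
    pvRuns my s t = if pvBad my s then 0 else t + s.sum + my := by
  intro n
  induction n with
  | zero =>
    intro s hs _ t
    have : s = [] := List.eq_nil_of_length_eq_zero (Nat.le_zero.mp hs)
    subst this; simp [pvRuns, pvBad]
  | succ m ih =>
    intro s hlen hpw t
    cases s with
    | nil => simp [pvRuns, pvBad]
    | cons x rest =>
      set same := rest.takeWhile (fun y => y == x) with hsame_def
      set after := rest.dropWhile (fun y => y == x) with hafter_def
      have hsplit : same ++ after = rest := List.takeWhile_append_dropWhile ..
      have hsame : ∀ y ∈ same, y = x := fun y hy => by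
        simpa using List.mem_takeWhile_imp hy
      have hx_le : ∀ y ∈ rest, x ≤ y := (List.pairwise_cons.mp hpw).1
      have hrest_pw : rest.Pairwise (· ≤ ·) := (List.pairwise_cons.mp hpw).2
      have hafter_pw : after.Pairwise (· ≤ ·) :=
        List.Pairwise.sublist (List.dropWhile_sublist _) hrest_pw
      have hafter_gt : ∀ k ∈ after, x < k := by
        cases hA : after with
        | nil => simp
        | cons y tail =>
          have hy_ne : (y == x) = false := by
            have := List.head?_dropWhile_not (fun y => y == x) rest
            rw [← hafter_def, hA] at this; simpa using this
          have hy_mem : y ∈ rest := (List.dropWhile_sublist _).mem (by rw [← hafter_def, hA]; simp)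
          have hxy : x < y := lt_of_le_of_ne (hx_le y hy_mem) (by simpa using Ne.symm (by simpa using hy_ne))
          intro k hk
          rcases List.mem_cons.mp hk with rfl | hk
          · exact hxy
          · have : y ≤ k := (List.pairwise_cons.mp (hA ▸ hafter_pw)).1 k hk
            exact lt_of_lt_of_le hxy this
      have hsame_cnt : same.count x = same.length :=
        List.count_eq_length.mpr (fun b hb => (hsame b hb).symm)
      have hafter_nx : after.count x = 0 :=
        List.count_eq_zero.mpr (fun h => lt_irrefl x (hafter_gt x h))
      have hcount_x : (x :: rest).count x = same.length + 1 := by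
        rw [List.count_cons_self, ← hsplit, List.count_append, hsame_cnt, hafter_nx]
      have hcount_after : ∀ k ∈ after, (x :: rest).count k = after.count k := by
        intro k hk
        have hkx : (x == k) = false := by simpa using (ne_of_gt (hafter_gt k hk)).symm
        have hsame_k : same.count k = 0 := List.count_eq_zero.mpr (fun h =>
          (ne_of_gt (hafter_gt k hk)) ((hsame k h).symm ▸ rfl))
        rw [List.count_cons, ← hsplit, List.count_append, hsame_k, hkx]
        simp
      have hsum : rest.sum = (same.length : Int) * x + after.sum := by
        rw [← hsplit, List.sum_append, List.sum_eq_card_nsmul same x hsame]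
        push_cast [nsmul_eq_mul]
        ring
      -- the 'bad' predicate decomposes
      have hany : pvBad my (x :: rest) =
          (((x :: rest).count x == 1 && decide (my < x)) || pvBad my after) := by
        rw [Bool.eq_iff_iff]
        unfold pvBad
        simp only [Bool.or_eq_true]
        rw [List.any_eq_true]
        constructor
        · rintro ⟨k, hk, hkk⟩
          rcases List.mem_cons.mp hk with rfl | hk
          · left; exact hkk
          · rcases List.mem_append.mp (hsplit ▸ hk) with h' | h'
            · left; rw [hsame k h'] at hkk; exact hkk
            · right; rw [List.any_eq_true]
              exact ⟨k, h', by rw [← hcount_after k h']; exact hkk⟩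
        · rintro (h | h)
          · exact ⟨x, List.mem_cons_self, h⟩
          · rw [List.any_eq_true] at h
            obtain ⟨k, hk, hkk⟩ := h
            exact ⟨k, List.mem_cons_of_mem _ (hsplit ▸ List.mem_append_right _ hk),
              by rw [hcount_after k hk]; exact hkk⟩
      -- unfold one step of pvRuns
      rw [show pvRuns my (x :: rest) t =
            (if ((same.length : Int) + 1) = 1 ∧ my < x then 0
             else pvRuns my after (t + x * ((same.length : Int) + 1))) from by
        rw [pvRuns]]
      have hguard : (((same.length : Int) + 1) = 1 ∧ my < x) ↔
          (((x :: rest).count x == 1 && decide (my < x)) = true) := by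
        rw [hcount_x]
        simp only [Bool.and_eq_true, beq_iff_eq, decide_eq_true_eq]
        constructor
        · rintro ⟨h1, h2⟩; exact ⟨by omega, h2⟩
        · rintro ⟨h1, h2⟩; exact ⟨by omega, h2⟩
      by_cases hg : ((same.length : Int) + 1) = 1 ∧ my < x
      · rw [if_pos hg, hany, (hguard.mp hg)]
        simp
      · rw [if_neg hg]
        have hlen' : after.length ≤ m := by
          have h1 : after.length ≤ rest.length := List.length_dropWhile_le _ _
          simp only [List.length_cons] at hlen
          omega
        rw [ih after hlen' hafter_pw]
        cases hgf : ((x :: rest).count x == 1 && decide (my < x)) with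
        | true => exact absurd (hguard.mpr hgf) hg
        | false =>
        rw [hany, hgf, Bool.false_or]
        cases h : pvBad my after with
        | true => simp
        | false =>
          simp only [Bool.false_eq_true, if_false, List.sum_cons]
          rw [hsum]; ring

theorem calc_my_points_eq (my : Int) (xs : List Int) :
    calc_my_points my xs = calc_my_points_alt my xs := by
  unfold calc_my_points calc_my_points_alt
  by_cases hmem : my ∈ xs
  · rw [if_pos, if_pos]
    · simpa using hmem
    · rw [PySem.Dict.getD_counter]
      exact_mod_cast List.count_pos_iff.mpr hmem
  · rw [if_neg, if_neg]
    · -- A side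
      rw [PySem.Dict.items_counter, pvLoopA_spec, List.any_map, List.map_map]
      have hb1 : ((PySem.Set.ofList xs).any
          ((fun kv : Int × Int => kv.2 == 1 && decide (my < kv.1)) ∘
            fun k => (k, (xs.count k : Int)))) = pvBad my xs := by
        rw [Bool.eq_iff_iff]
        unfold pvBad
        rw [List.any_eq_true, List.any_eq_true]
        constructor
        · rintro ⟨k, hk, hkk⟩
          simp only [Function.comp_apply, Bool.and_eq_true, beq_iff_eq] at hkk
          exact ⟨k, (PySem.Set.mem_ofList xs k).mp hk,
            by simp only [Bool.and_eq_true, beq_iff_eq]; exact ⟨by exact_mod_cast hkk.1, hkk.2⟩⟩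
        · rintro ⟨k, hk, hkk⟩
          simp only [Bool.and_eq_true, beq_iff_eq] at hkk
          exact ⟨k, (PySem.Set.mem_ofList xs k).mpr hk,
            by simp only [Function.comp_apply, Bool.and_eq_true, beq_iff_eq]
               exact ⟨by exact_mod_cast hkk.1, hkk.2⟩⟩
      have hb3 : (((PySem.Set.ofList xs).map
          ((fun kv : Int × Int => kv.1 * kv.2) ∘ fun k => (k, (xs.count k : Int)))).sum) = xs.sum := by
        simpa [Function.comp] using pvSum_counter xs
      rw [hb1, hb3]
      -- B side
      have hperm := PySem.List.sorted_perm xs (fun x => x) false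
      have hpw : (PySem.List.sorted xs (fun x => x) false).Pairwise (· ≤ ·) := by
        simpa using PySem.List.sorted_pairwise xs (fun x => x)
      rw [pvRuns_spec my (PySem.List.sorted xs (fun x => x) false).length _ le_rfl hpw 0]
      have hb2 : pvBad my (PySem.List.sorted xs (fun x => x) false) = pvBad my xs := by
        rw [Bool.eq_iff_iff]
        unfold pvBad
        rw [List.any_eq_true, List.any_eq_true]
        constructor
        · rintro ⟨k, hk, hkk⟩
          exact ⟨k, hperm.mem_iff.mp hk, by rw [← hperm.count_eq]; exact hkk⟩
        · rintro ⟨k, hk, hkk⟩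
          exact ⟨k, hperm.mem_iff.mpr hk, by rw [hperm.count_eq]; exact hkk⟩
      rw [hb2, hperm.sum_eq]
    · simpa using hmem
    · rw [PySem.Dict.getD_counter, List.count_eq_zero.mpr hmem]
      simp

-- ===== VERDICT (by name: the statement is the Claim_ definition above) =====
theorem calc_my_points_spec : Claim_equal_calc_my_points := by
  intro my xs _
  unfold Spec_calc_my_points
  exact calc_my_points_eq my xs
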